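-- pv_equiv track=rewrite | github.com/KristianFenn/AoC2020 | day14.py | generate_floating_permutations
-- ===== SOURCE A (Python) =====
-- def generate_floating_permutations(bit_array):
--     result = []
--     for idx,bit in enumerate(bit_array):
--         if bit == "X":
--             with_zero = bit_array.copy()
--             with_zero[idx] = "0"
--             with_one = bit_array.copy()
--             with_one[idx] = "1"
--             result += generate_floating_permutations(with_zero)
--             result += generate_floating_permutations(with_one)
--             return result
--
--     return ["".join(bit_array)]
-- ===== SOURCE B (Python) =====
-- def generate_floating_permutations(bit_array):
--     result = [[]]
--     for bit in bit_array:
--         if bit == "X":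
--             result = [s + [b] for s in result for b in "01"]
--         else:
--             for s in result:
--                 s.append(bit)
--     return ["".join(s) for s in result]
-- ===== Notes on version B (the rewrite author's own statement) =====
-- stated objective: simpler
-- what changed: Replaces A's recursion that copies the whole list and restarts the scan at each wildcard with a single left-to-right fold keeping the list of partial results (as fragment lists, doubled at each 'X' and joined once at the end).
import Mathlib
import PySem

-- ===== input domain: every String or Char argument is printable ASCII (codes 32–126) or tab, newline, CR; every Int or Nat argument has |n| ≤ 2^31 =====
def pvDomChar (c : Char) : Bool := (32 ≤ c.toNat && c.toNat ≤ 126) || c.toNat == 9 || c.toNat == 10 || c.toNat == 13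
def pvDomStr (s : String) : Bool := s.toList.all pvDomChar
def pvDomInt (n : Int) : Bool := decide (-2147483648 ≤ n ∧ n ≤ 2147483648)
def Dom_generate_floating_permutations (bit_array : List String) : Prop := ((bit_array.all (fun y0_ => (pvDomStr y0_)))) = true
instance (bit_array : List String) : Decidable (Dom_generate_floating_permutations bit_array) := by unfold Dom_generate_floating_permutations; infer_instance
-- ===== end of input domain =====

-- B replaces A's copy-and-recurse expansion of the first 'X' by a single left-to-right
-- fold over the list that keeps all partial strings, doubling them at each 'X' (simpler, no list copies).

-- ===== PORT A =====
-- the 'for idx,bit in enumerate(bit_array): if bit == "X": … return' loop: index of the first "X", if any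
def pvFindX : List String → Option Nat
  | [] => none
  | b :: rest => if b == "X" then some 0 else (pvFindX rest).map (· + 1)

-- needed by the port's termination proof (cited in decreasing_by)
theorem pvFindX_decomp : ∀ (l : List String) (i : Nat), pvFindX l = some i →
    ∃ p q, l = p ++ "X" :: q ∧ p.length = i ∧ "X" ∉ p := by
  intro l
  induction l with
  | nil => intro i h; simp [pvFindX] at h
  | cons b rest ih =>
    intro i h
    by_cases hb : b = "X"
    · subst hb
      simp [pvFindX] at h
      exact ⟨[], rest, by simp [← h]⟩
    · simp [pvFindX, hb] at h
      obtain ⟨j, hj, hji⟩ := h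
      obtain ⟨p, q, hl, hp, hnp⟩ := ih j hj
      exact ⟨b :: p, q, by simp [hl], by simp [hp, ← hji], by simp [hnp]; exact Ne.symm hb⟩

theorem pv_set_mid (p q : List String) (x v : String) :
    (p ++ x :: q).set p.length v = p ++ v :: q := by
  induction p with
  | nil => simp
  | cons a p ih => simp [ih]

theorem pvFindX_count_lt (l : List String) (i : Nat) (v : String)
    (hfind : pvFindX l = some i) (hv : v ≠ "X") :
    (l.set i v).count "X" < l.count "X" := by
  obtain ⟨p, q, hl, hp, _⟩ := pvFindX_decomp l i hfind
  subst hl; subst hp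
  rw [pv_set_mid]
  simp [List.count_append, hv]

-- ''.join(bit_array) is ported by hand as a left fold of string concatenation (exact: empty separator)
def generate_floating_permutations (bit_array : List String) : List String :=
  match h : pvFindX bit_array with
  | some i =>
      generate_floating_permutations (bit_array.set i "0")
        ++ generate_floating_permutations (bit_array.set i "1")
  | none => [bit_array.foldl (· ++ ·) ""]
termination_by bit_array.count "X"
decreasing_by
  · exact pvFindX_count_lt _ _ _ h (by decide)
  · exact pvFindX_count_lt _ _ _ h (by decide)

-- ===== PORT B =====
-- one step of B's loop body: partial results are kept as fragment lists, joined at the end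
def pvStep (acc : List (List String)) (bit : String) : List (List String) :=
  if bit == "X" then acc.flatMap (fun s => [s ++ ["0"], s ++ ["1"]])
  else acc.map (fun s => s ++ [bit])

-- ''.join(s) ported by hand as a left fold of string concatenation (exact: empty separator)
def generate_floating_permutations_alt (bit_array : List String) : List String :=
  (bit_array.foldl pvStep [[]]).map (fun s => s.foldl (· ++ ·) "")

-- ===== PRECONDITION & SPEC =====
def Spec_generate_floating_permutations (bit_array : List String) (out : List String) : Prop := out = generate_floating_permutations_alt bit_array
instance (bit_array : List String) (out : List String) : Decidable (Spec_generate_floating_permutations bit_array out) := by unfold Spec_generate_floating_permutations; infer_instance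

-- ===== CLAIM (what is proved, stated in full; the proofs are below) =====
def Claim_equal_generate_floating_permutations : Prop := ∀ (bit_array : List String), Dom_generate_floating_permutations bit_array → Spec_generate_floating_permutations bit_array (generate_floating_permutations bit_array)

-- ===== LEMMAS AND PROOFS =====

theorem pvFindX_none : ∀ l : List String, pvFindX l = none → "X" ∉ l := by
  intro l
  induction l with
  | nil => simp
  | cons b rest ih =>
    intro h
    by_cases hb : b = "X"
    · simp [pvFindX, hb] at h
    · simp [pvFindX, hb] at h
      simp [ih h]
      exact Ne.symm hb

-- on an X-free segment, B's fold just appends the segment to every fragment list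
theorem pvStep_noX (l : List String) (hl : "X" ∉ l) :
    ∀ acc : List (List String),
      l.foldl pvStep acc = acc.map (fun s => s ++ l) := by
  induction l with
  | nil => intro acc; simp
  | cons b rest ih =>
    intro acc
    have hb : b ≠ "X" := fun h => hl (by simp [h])
    have hrest : "X" ∉ rest := fun h => hl (by simp [h])
    rw [List.foldl_cons]
    have hs : pvStep acc b = acc.map (fun s => s ++ [b]) := by unfold pvStep; simp [hb]
    rw [hs, ih hrest, List.map_map]
    simp

-- B's fold distributes over an append of accumulators
theorem pvStep_foldl_append (q : List String) :
    ∀ a b : List (List String),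
      q.foldl pvStep (a ++ b) = q.foldl pvStep a ++ q.foldl pvStep b := by
  induction q with
  | nil => intro a b; simp
  | cons x rest ih =>
    intro a b
    have hx : pvStep (a ++ b) x = pvStep a x ++ pvStep b x := by
      unfold pvStep; split_ifs <;> simp
    simp [List.foldl_cons, hx, ih]

theorem pvAeqB (l : List String) :
    generate_floating_permutations l = generate_floating_permutations_alt l := by
  generalize hn : l.count "X" = n
  induction n using Nat.strong_induction_on generalizing l with
  | _ n IH =>
    rw [generate_floating_permutations.eq_def]
    split
    next i h =>
      obtain ⟨p, q, hl, hp, hnp⟩ := pvFindX_decomp l i h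
      subst hl; subst hp
      have hcnt : p.count "X" + q.count "X" < n := by
        rw [← hn]; simp [List.count_append]
      have h0 : ((p ++ "X" :: q).set p.length "0") = p ++ "0" :: q := pv_set_mid p q _ _
      have h1 : ((p ++ "X" :: q).set p.length "1") = p ++ "1" :: q := pv_set_mid p q _ _
      have c0 : (p ++ "0" :: q).count "X" = p.count "X" + q.count "X" := by
        simp [List.count_append]
      have c1 : (p ++ "1" :: q).count "X" = p.count "X" + q.count "X" := by
        simp [List.count_append]
      rw [h0, h1, IH _ hcnt _ c0, IH _ hcnt _ c1]
      -- now everything is B's fold; split B on l = p ++ "X" :: q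
      unfold generate_floating_permutations_alt
      rw [List.foldl_append, List.foldl_append, List.foldl_append,
        pvStep_noX p hnp [[]]]
      simp only [List.map_cons, List.map_nil, List.nil_append, List.foldl_cons]
      have hsplit : pvStep [p] "X" = pvStep [p] "0" ++ pvStep [p] "1" := by
        unfold pvStep; simp
      rw [hsplit, pvStep_foldl_append, List.map_append]
    next h =>
      have hnoX : "X" ∉ l := pvFindX_none l h
      show _ = generate_floating_permutations_alt l
      unfold generate_floating_permutations_alt
      rw [pvStep_noX l hnoX [[]]]
      simp

-- ===== VERDICT (by name: the statement is the Claim_ definition above) =====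
theorem generate_floating_permutations_spec : Claim_equal_generate_floating_permutations := by
  intro l _
  exact pvAeqB l
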